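-- pv_equiv track=rewrite | github.com/ZhengJiaCode/Selection_strength_evolvability | 2020sel_Scripts/6_determine_amino_acid_changing_mutation_frequency_not_below30%.py | PosMutsort
-- ===== SOURCE A (Python) =====
-- ref="MVSKGEELFTGVVPILVELDGDVNGHKFSVSGEGEGDATYGKLTLKFICTTGKLPVPWPTLVTTFGYGLQCFARYPDHMKLHDFFKSAMPEGYVQERTIFFKDDGNYKTRAEVKFEGDTLVNRIELKGIDFKEDGNILGHKLEYNYNSHNVYIMADKQKNGIKVNFKIRHNIEDGSVQLADHYQQNTPIGDGPVLLPDNHYLSYQSALSKDPNEKRDHMVLLEFVTAAGITLGMDELYK*"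
--
-- def PosMutsort(mutlist):
-- 	PosMut=[]
-- 	PosMutsort=[]
-- 	for mut in set(mutlist):
-- 		PosMut.append([mut[1:-1],mut])
-- 	for i in range (len(ref)):
-- 		for j in range (len(PosMut)):
-- 			if PosMut[j][0]==str(i):
-- 				PosMutsort.append(PosMut[j])
-- 	return PosMutsort
-- ===== SOURCE B (Python) =====
-- ref="MVSKGEELFTGVVPILVELDGDVNGHKFSVSGEGEGDATYGKLTLKFICTTGKLPVPWPTLVTTFGYGLQCFARYPDHMKLHDFFKSAMPEGYVQERTIFFKDDGNYKTRAEVKFEGDTLVNRIELKGIDFKEDGNILGHKLEYNYNSHNVYIMADKQKNGIKVNFKIRHNIEDGSVQLADHYQQNTPIGDGPVLLPDNHYLSYQSALSKDPNEKRDHMVLLEFVTAAGITLGMDELYK*"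
--
-- def PosMutsort(mutlist):
-- 	valid = {str(i) for i in range(len(ref))}
-- 	PosMut = [[mut[1:-1], mut] for mut in dict.fromkeys(mutlist) if mut[1:-1] in valid]
-- 	PosMut.sort(key=lambda x: int(x[0]))
-- 	return PosMut
-- ===== Notes on version B (the rewrite author's own statement) =====
-- stated objective: faster
-- what changed: A scans the deduplicated mutation list once for every reference position (240 passes, comparing each entry's position string against str(i)); B makes one pass keeping only entries whose position string is in the set {str(i) for i in range(len(ref))} and stable-sorts them by int(position), deduplicating with dict.fromkeys so the result never depends on the hash seed.
-- outside the precondition, e.g. on PosMutsort(['A5T', 'G5C']): A returns [['5', 'G5C'], ['5', 'A5T']], B returns [['5', 'A5T'], ['5', 'G5C']]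
import Mathlib
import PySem

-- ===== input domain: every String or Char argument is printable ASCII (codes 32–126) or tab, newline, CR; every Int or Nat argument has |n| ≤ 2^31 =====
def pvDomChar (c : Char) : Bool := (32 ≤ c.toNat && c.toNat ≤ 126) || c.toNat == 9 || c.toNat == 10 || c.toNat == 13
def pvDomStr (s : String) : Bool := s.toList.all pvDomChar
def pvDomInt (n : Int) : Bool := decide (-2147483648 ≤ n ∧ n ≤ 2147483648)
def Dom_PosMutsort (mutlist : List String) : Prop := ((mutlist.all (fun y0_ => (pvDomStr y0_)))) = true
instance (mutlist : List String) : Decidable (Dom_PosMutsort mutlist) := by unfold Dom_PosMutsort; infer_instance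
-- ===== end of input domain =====

-- B replaces A's scan of the mutation list once per reference position (240 passes) by one
-- filtered pass over the deduplicated list plus a stable sort of the kept entries by integer
-- position (objective: faster). B deduplicates with dict.fromkeys (first occurrences) instead
-- of set(), so its output never depends on the interpreter's hash seed.

-- the module constant ref (240 characters)
def pvRef : String := "MVSKGEELFTGVVPILVELDGDVNGHKFSVSGEGEGDATYGKLTLKFICTTGKLPVPWPTLVTTFGYGLQCFARYPDHMKLHDFFKSAMPEGYVQERTIFFKDDGNYKTRAEVKFEGDTLVNRIELKGIDFKEDGNILGHKLEYNYNSHNVYIMADKQKNGIKVNFKIRHNIEDGSVQLADHYQQNTPIGDGPVLLPDNHYLSYQSALSKDPNEKRDHMVLLEFVTAAGITLGMDELYK*"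

-- mut[1:-1]
def pvMid (s : String) : String := PySem.Str.slice s (some 1) (some (-1))

-- ===== PORT A =====
def PosMutsort (mutlist : List String) : List (List String) :=
  -- PosMut: for mut in set(mutlist): PosMut.append([mut[1:-1], mut])
  let posMut : List (List String) :=
    (PySem.Set.ofList mutlist).foldl (fun acc m => acc ++ [[pvMid m, m]]) []
  -- for i in range(len(ref)): for j in range(len(PosMut)): if PosMut[j][0]==str(i): append PosMut[j]
  (PySem.List.pyRange 0 (PySem.Str.len pvRef) 1).foldl (fun acc i =>
    (PySem.List.pyRange 0 (posMut.length : Int) 1).foldl (fun acc2 j =>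
      let p := PySem.List.pyGetD posMut j []
      if PySem.List.pyGetD p 0 "" == PySem.Int.toStr i then acc2 ++ [p] else acc2) acc) []

-- ===== PORT B =====
def PosMutsort_alt (mutlist : List String) : List (List String) :=
  -- valid = {str(i) for i in range(len(ref))}
  let valid : PySem.Set String :=
    PySem.Set.ofList ((PySem.List.pyRange 0 (PySem.Str.len pvRef) 1).map PySem.Int.toStr)
  -- PosMut = [[mut[1:-1], mut] for mut in dict.fromkeys(mutlist) if mut[1:-1] in valid]
  let posMut : List (List String) :=
    ((PySem.List.dedup mutlist).filter (fun m => PySem.Set.contains valid (pvMid m))).map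
      (fun m => [pvMid m, m])
  -- PosMut.sort(key=lambda x: int(x[0]))  (stable)
  PySem.List.sorted posMut (fun x => (PySem.Int.ofStr? (PySem.List.pyGetD x 0 "")).getD 0) false

-- ===== PRECONDITION & SPEC =====
-- the valid position strings str(0) … str(239)
def pvValidPos : List String := (PySem.List.pyRange 0 240 1).map PySem.Int.toStr

-- Pre_ excludes lists holding two DISTINCT mutation strings with the same in-range position
-- (e.g. ["A5T","G5C"]): there A's output order is Python's accidental set-iteration order
-- (hash-seed dependent), which no port can reproduce; everywhere else the order is forced.
def Pre_PosMutsort (mutlist : List String) : Prop :=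
  ∀ x ∈ mutlist, ∀ y ∈ mutlist, x ≠ y → pvMid x = pvMid y → pvMid x ∉ pvValidPos
instance (mutlist : List String) : Decidable (Pre_PosMutsort mutlist) := by
  unfold Pre_PosMutsort; infer_instance

def pvWitness_PosMutsort : List String := ["A5T", "K7R", "A5T", "X240Y", "Q"]

def Spec_PosMutsort (mutlist : List String) (out : List (List String)) : Prop := out = PosMutsort_alt mutlist
instance (mutlist : List String) (out : List (List String)) : Decidable (Spec_PosMutsort mutlist out) := by unfold Spec_PosMutsort; infer_instance

-- ===== CLAIM (what is proved, stated in full; the proofs are below) =====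
def Claim_equal_PosMutsort : Prop := ∀ (mutlist : List String), Dom_PosMutsort mutlist → Pre_PosMutsort mutlist → Spec_PosMutsort mutlist (PosMutsort mutlist)

-- ===== LEMMAS AND PROOFS =====
set_option maxRecDepth 4000 in
theorem pvRound : ∀ i ∈ PySem.List.pyRange 0 240 1,
    PySem.Int.ofStr? (PySem.Int.toStr i) = some i := by decide

set_option maxRecDepth 4000 in
theorem pvLenRef : PySem.Str.len pvRef = 240 := by decide

theorem pvInj : ∀ i ∈ PySem.List.pyRange 0 240 1, ∀ j ∈ PySem.List.pyRange 0 240 1,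
    PySem.Int.toStr i = PySem.Int.toStr j → i = j := by
  intro i hi j hj h
  have h1 := pvRound i hi
  have h2 := pvRound j hj
  rw [h, h2] at h1
  exact (Option.some.inj h1).symm

theorem pvInner (P : List (List String)) (i : Int) (acc : List (List String)) :
    (PySem.List.pyRange 0 (P.length : Int) 1).foldl (fun acc2 j =>
      let p := PySem.List.pyGetD P j []
      if PySem.List.pyGetD p 0 "" == PySem.Int.toStr i then acc2 ++ [p] else acc2) acc
    = acc ++ P.filter (fun p => PySem.List.pyGetD p 0 "" == PySem.Int.toStr i) := by
  rw [PySem.List.foldl_pyRange_zero_pyGetD' P []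
      (fun acc2 p => if PySem.List.pyGetD p 0 "" == PySem.Int.toStr i then acc2 ++ [p] else acc2) acc]
  exact PySem.List.foldl_append_if_eq_filter _ P acc

theorem pvA_eq (mutlist : List String) :
    PosMutsort mutlist =
      (PySem.List.pyRange 0 240 1).flatMap (fun i =>
        ((PySem.Set.ofList mutlist).filter (fun m => pvMid m == PySem.Int.toStr i)).map
          (fun m => [pvMid m, m])) := by
  conv_lhs => unfold PosMutsort
  conv_lhs => rw [pvLenRef, PySem.List.foldl_append_singleton_eq_map]
  simp only [List.nil_append, pvInner]
  rw [PySem.List.foldl_append_eq_flatMap]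
  rw [List.nil_append]
  congr 1
  funext i
  rw [List.filter_map]
  congr 1

theorem pvB_eq (mutlist : List String) :
    PosMutsort_alt mutlist =
      PySem.List.sorted
        (((PySem.Set.ofList mutlist).filter
            (fun m => PySem.Set.contains (PySem.Set.ofList pvValidPos) (pvMid m))).map
          (fun m => [pvMid m, m]))
        (fun x => (PySem.Int.ofStr? (PySem.List.pyGetD x 0 "")).getD 0) false := by
  unfold PosMutsort_alt pvValidPos
  rw [pvLenRef]
  simp only [PySem.List.dedup_eq_ofList]

theorem pvSumIte (l : List Int) (p : Int → Bool) (c : Nat) :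
    (l.map (fun i => if p i then c else 0)).sum = c * l.countP p := by
  induction l with
  | nil => simp
  | cons a t ih =>
    simp only [List.map_cons, List.sum_cons, List.countP_cons, ih]
    by_cases h : p a
    · simp [h]; ring
    · simp [h]

theorem pvCountPOne {α : Type} (l : List α) (p : α → Bool) (hn : l.Nodup) (i0 : α)
    (h0 : i0 ∈ l) (hp : p i0 = true) (hu : ∀ j ∈ l, p j = true → j = i0) :
    l.countP p = 1 := by
  induction l with
  | nil => cases h0
  | cons a t ih =>
    rw [List.countP_cons]
    rcases List.mem_cons.mp h0 with rfl | hmem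
    · have ht : t.countP p = 0 := by
        rw [List.countP_eq_zero]
        intro j hj hpj
        have := hu j (List.mem_cons_of_mem _ hj) hpj
        subst this
        exact (List.nodup_cons.mp hn).1 hj
      simp [ht, hp]
    · have ha : p a = false := by
        by_contra hc
        have : p a = true := by revert hc; cases h : p a <;> simp_all
        have := hu a List.mem_cons_self this
        subst this
        exact (List.nodup_cons.mp hn).1 hmem
      rw [ih (List.nodup_cons.mp hn).2 hmem
          (fun j hj hpj => hu j (List.mem_cons_of_mem _ hj) hpj)]
      simp [ha]

-- the permutation half
theorem pvPerm (mutlist : List String) :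
    ((PySem.List.pyRange 0 240 1).flatMap (fun i =>
        (PySem.Set.ofList mutlist).filter (fun m => pvMid m == PySem.Int.toStr i))).Perm
      ((PySem.Set.ofList mutlist).filter
        (fun m => PySem.Set.contains (PySem.Set.ofList pvValidPos) (pvMid m))) := by
  apply List.perm_iff_count.mpr
  intro a
  rw [List.count_flatMap]
  have hbucket : ∀ i : Int,
      (List.count a ∘ fun i => (PySem.Set.ofList mutlist).filter (fun m => pvMid m == PySem.Int.toStr i)) i
        = if (pvMid a == PySem.Int.toStr i) then List.count a (PySem.Set.ofList mutlist) else 0 := by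
    intro i
    simp only [Function.comp_apply]
    by_cases h : (pvMid a == PySem.Int.toStr i) = true
    · rw [List.count_filter (p := fun m => pvMid m == PySem.Int.toStr i) h, if_pos h]
    · rw [if_neg h, List.count_eq_zero]
      intro hmem
      exact h (List.mem_filter.mp hmem).2
  rw [List.map_congr_left (fun i _ => hbucket i)]
  rw [pvSumIte]
  by_cases hv : PySem.Set.contains (PySem.Set.ofList pvValidPos) (pvMid a) = true
  · -- pvMid a is a valid position string: exactly one i matches
    have hmem : pvMid a ∈ pvValidPos := by
      have := (PySem.Set.contains_iff _ _).mp hv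
      exact (PySem.Set.mem_ofList _ _).mp this
    obtain ⟨i0, hi0, hti0⟩ := List.mem_map.mp hmem
    have hcp : (PySem.List.pyRange 0 240 1).countP (fun i => pvMid a == PySem.Int.toStr i) = 1 := by
      apply pvCountPOne _ _ (PySem.List.nodup_pyRange_one 0 240) i0 hi0
      · simp [← hti0]
      · intro j hj hpj
        have : pvMid a = PySem.Int.toStr j := by simpa using hpj
        exact pvInj j hj i0 hi0 (this ▸ hti0.symm) |>.symm ▸ rfl
    rw [hcp, Nat.mul_one,
      List.count_filter (p := fun m => PySem.Set.contains (PySem.Set.ofList pvValidPos) (pvMid m)) hv]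
  · -- no i matches
    have hcp : (PySem.List.pyRange 0 240 1).countP (fun i => pvMid a == PySem.Int.toStr i) = 0 := by
      rw [List.countP_eq_zero]
      intro i hi hpi
      apply hv
      rw [PySem.Set.contains_iff, PySem.Set.mem_ofList]
      have : pvMid a = PySem.Int.toStr i := by simpa using hpi
      exact this ▸ List.mem_map.mpr ⟨i, hi, rfl⟩
    have hv' : (PySem.Set.contains (PySem.Set.ofList pvValidPos) (pvMid a)) = false := by
      revert hv; cases PySem.Set.contains (PySem.Set.ofList pvValidPos) (pvMid a) <;> simp
    rw [hcp, Nat.mul_zero]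
    symm
    rw [List.count_eq_zero]
    intro hmem
    have := (List.mem_filter.mp hmem).2
    rw [hv'] at this
    cases this

theorem pvPairwise (mutlist : List String) (hpre : Pre_PosMutsort mutlist) :
    ((PySem.List.pyRange 0 240 1).flatMap (fun i =>
        ((PySem.Set.ofList mutlist).filter (fun m => pvMid m == PySem.Int.toStr i)).map
          (fun m => [pvMid m, m]))).Pairwise
      (fun x y => (fun x => (PySem.Int.ofStr? (PySem.List.pyGetD x 0 "")).getD 0) x
        < (fun x => (PySem.Int.ofStr? (PySem.List.pyGetD x 0 "")).getD 0) y) := by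
  rw [List.pairwise_flatMap]
  constructor
  · intro i hi
    rw [List.pairwise_map]
    apply List.Pairwise.imp_of_mem ?_ ((PySem.Set.nodup_ofList mutlist).filter _)
    intro a b ha hb hne
    exfalso
    have ha' := List.mem_filter.mp ha
    have hb' := List.mem_filter.mp hb
    have hma : pvMid a = PySem.Int.toStr i := by simpa using ha'.2
    have hmb : pvMid b = PySem.Int.toStr i := by simpa using hb'.2
    exact hpre a ((PySem.Set.mem_ofList _ _).mp ha'.1) b ((PySem.Set.mem_ofList _ _).mp hb'.1)
      hne (hma.trans hmb.symm) (hma ▸ List.mem_map.mpr ⟨i, hi, rfl⟩)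
  · apply List.Pairwise.imp_of_mem ?_ (PySem.List.pairwise_lt_pyRange_one 0 240)
    intro i j hi hj hij x hx y hy
    obtain ⟨a, ha, rfl⟩ := List.mem_map.mp hx
    obtain ⟨b, hb, rfl⟩ := List.mem_map.mp hy
    have hma : pvMid a = PySem.Int.toStr i := by simpa using (List.mem_filter.mp ha).2
    have hmb : pvMid b = PySem.Int.toStr j := by simpa using (List.mem_filter.mp hb).2
    simp only [hma, hmb, PySem.List.pyGetD_ofNat', List.getD_cons_zero,
      pvRound i hi, pvRound j hj, Option.getD_some]
    exact hij

theorem pvMain (mutlist : List String) (hpre : Pre_PosMutsort mutlist) :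
    PosMutsort mutlist = PosMutsort_alt mutlist := by
  rw [pvA_eq, pvB_eq]
  symm
  apply PySem.List.sorted_eq_of_perm_of_pairwise_lt
  · have := (pvPerm mutlist).map (fun m => [pvMid m, m])
    rwa [List.map_flatMap] at this
  · exact pvPairwise mutlist hpre

-- ===== VERDICT (by name: the statement is the Claim_ definition above) =====
theorem PosMutsort_spec : Claim_equal_PosMutsort := by
  intro mutlist _ hpre
  unfold Spec_PosMutsort
  exact pvMain mutlist hpre
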